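-- pv_equiv track=rewrite | github.com/thomas-hoger/5G-Anomaly-Detection | src/networkanomalydetection/core/vectorization/hierarchical_handler.py | _construct_instance_path
-- ===== SOURCE A (Python) =====
-- from typing import Dict, List, Any, Optional
--
-- def _construct_instance_path(levels: List[str], indices: List[int]) -> str:
--     """Construit le chemin d'instance complet"""
--     if not levels:
--         return ""
--
--     parts = []
--     index_pos = 0
--
--     for level in levels:
--         if index_pos < len(indices):
--             parts.append(f"{level}[{indices[index_pos]}]")
--             index_pos += 1
--         else:
--             parts.append(level)
--
--     return ".".join(parts)
-- ===== SOURCE B (Python) =====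
-- from typing import List
--
-- def _construct_instance_path(levels: List[str], indices: List[int]) -> str:
--     """Construit le chemin d'instance complet"""
--     if not levels:
--         return ""
--     head = levels[0] + (f"[{indices[0]}]" if indices else "")
--     tail = _construct_instance_path(levels[1:], indices[1:])
--     return head if len(levels) == 1 else head + "." + tail
-- ===== Notes on version B (the rewrite author's own statement) =====
-- stated objective: simpler
-- what changed: Replaced A's imperative loop that accumulates a parts list with a manual index counter and then joins them, by a direct structural recursion on the two lists that builds the dotted string itself (head segment plus '.' plus recursive tail), with no intermediate list, no counter and no join; the empty-levels guard falls out of the base case.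
import Mathlib
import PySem

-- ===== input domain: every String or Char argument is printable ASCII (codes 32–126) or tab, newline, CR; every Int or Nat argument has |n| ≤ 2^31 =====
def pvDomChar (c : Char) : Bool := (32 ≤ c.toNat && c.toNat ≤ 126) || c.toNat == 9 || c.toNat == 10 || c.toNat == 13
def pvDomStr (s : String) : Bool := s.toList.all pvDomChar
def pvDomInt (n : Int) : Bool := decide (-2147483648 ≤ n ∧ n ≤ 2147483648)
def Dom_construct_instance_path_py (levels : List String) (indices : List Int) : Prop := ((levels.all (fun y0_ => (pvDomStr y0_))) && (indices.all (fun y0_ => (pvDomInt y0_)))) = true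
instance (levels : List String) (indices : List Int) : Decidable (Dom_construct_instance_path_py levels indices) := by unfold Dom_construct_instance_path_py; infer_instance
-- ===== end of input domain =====

-- B replaces A's accumulate-parts-then-join loop with a direct structural recursion on the
-- two lists that builds the dotted string itself, with no parts list, no counter and no join;
-- objective: simpler.

-- ===== PORT A =====
-- A's loop: for level in levels, append either "level[indices[pos]]" (and bump pos) or plain level.
def pvGoA (indices : List Int) : List String → Nat → List String → List String
  | [], _, parts => parts
  | l :: ls, pos, parts =>
    if pos < indices.length then
      pvGoA indices ls (pos + 1) (parts ++ [l ++ "[" ++ PySem.Int.toStr (indices.getD pos 0) ++ "]"])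
    else
      pvGoA indices ls pos (parts ++ [l])

def construct_instance_path_py (levels : List String) (indices : List Int) : String :=
  if levels = [] then "" else PySem.Str.join "." (pvGoA indices levels 0 [])

-- ===== PORT B =====
-- Source B: recursion on levels; head = levels[0] (+ "[indices[0]]" if indices nonempty),
-- tail = recursive call on the rests; return head alone iff levels is a singleton.
def construct_instance_path_py_alt : List String → List Int → String
  | [], _ => ""
  | l :: ls, inds =>
    let head := l ++ (match inds with | [] => "" | i :: _ => "[" ++ PySem.Int.toStr i ++ "]")
    let tail := construct_instance_path_py_alt ls inds.tail
    if ls = [] then head else head ++ "." ++ tail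

-- ===== PRECONDITION & SPEC =====
def Spec_construct_instance_path_py (levels : List String) (indices : List Int) (out : String) : Prop := out = construct_instance_path_py_alt levels indices
instance (levels : List String) (indices : List Int) (out : String) : Decidable (Spec_construct_instance_path_py levels indices out) := by unfold Spec_construct_instance_path_py; infer_instance

-- ===== CLAIM (what is proved, stated in full; the proofs are below) =====
def Claim_equal_construct_instance_path_py : Prop := ∀ (levels : List String) (indices : List Int), Dom_construct_instance_path_py levels indices → Spec_construct_instance_path_py levels indices (construct_instance_path_py levels indices)

-- ===== LEMMAS AND PROOFS =====

lemma pv_join_singleton (x : String) : PySem.Str.join "." [x] = x := by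
  simp only [PySem.Str.join, PySem.Chars.join, List.map_cons, List.map_nil, List.intercalate,
    List.intersperse, List.flatten_cons, List.flatten_nil, List.append_nil, String.ofList_toList]

lemma pv_join_cons_cons (x y : String) (ys : List String) :
    PySem.Str.join "." (x :: y :: ys) = x ++ "." ++ PySem.Str.join "." (y :: ys) := by
  simp only [PySem.Str.join, PySem.Chars.join, List.map_cons, List.intercalate,
    List.intersperse, List.flatten_cons, String.ofList_append, String.ofList_toList]
  rw [String.append_assoc]

lemma pv_join_cons (x : String) (t : List String) (ht : t ≠ []) :
    PySem.Str.join "." (x :: t) = x ++ "." ++ PySem.Str.join "." t := by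
  cases t with
  | nil => exact absurd rfl ht
  | cons y ys => exact pv_join_cons_cons x y ys

-- A's accumulated loop, characterised as indexed-prefix ++ plain tail.
lemma pvGoA_eq (indices : List Int) (ls : List String) :
    ∀ (pos : Nat) (parts : List String),
      pvGoA indices ls pos parts =
        parts ++ ((ls.zip (indices.drop pos)).map (fun p => p.1 ++ "[" ++ PySem.Int.toStr p.2 ++ "]"))
          ++ ls.drop (indices.length - pos) := by
  induction ls with
  | nil => intro pos parts; simp [pvGoA]
  | cons l ls ih =>
    intro pos parts
    by_cases h : pos < indices.length
    · have hdrop : indices.drop pos = indices[pos] :: indices.drop (pos + 1) :=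
        (List.getElem_cons_drop h).symm
      have hsub : indices.length - pos = (indices.length - (pos + 1)) + 1 := by omega
      have hgetD : indices.getD pos 0 = indices[pos] := List.getD_eq_getElem _ _ h
      simp only [pvGoA, if_pos h, ih, hdrop, hsub, hgetD, List.zip_cons_cons, List.map_cons,
        List.drop_succ_cons, List.append_assoc, List.cons_append, List.nil_append]
    · have hdrop : indices.drop pos = [] := List.drop_eq_nil_of_le (by omega)
      have hsub : indices.length - pos = 0 := by omega
      simp only [pvGoA, if_neg h, ih, hdrop, hsub, List.zip_nil_right, List.map_nil,
        List.drop_zero, List.nil_append, List.append_assoc, List.singleton_append]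

-- B's recursion computes the join of that same parts list.
lemma alt_eq (ls : List String) : ∀ (inds : List Int),
    construct_instance_path_py_alt ls inds =
      PySem.Str.join "."
        (((ls.zip inds).map (fun p => p.1 ++ "[" ++ PySem.Int.toStr p.2 ++ "]"))
          ++ ls.drop inds.length) := by
  induction ls with
  | nil => intro inds; simp [construct_instance_path_py_alt, PySem.Str.join, PySem.Chars.join,
      List.intercalate]
  | cons l ls ih =>
    intro inds
    cases inds with
    | nil =>
      simp only [construct_instance_path_py_alt, List.zip_nil_right, List.map_nil,
        List.length_nil, List.drop_zero, List.nil_append, List.tail_nil]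
      cases ls with
      | nil => simp [pv_join_singleton]
      | cons y ys =>
        rw [if_neg (by simp), pv_join_cons_cons, ih []]
        simp
    | cons i is =>
      simp only [construct_instance_path_py_alt, List.zip_cons_cons, List.map_cons,
        List.length_cons, List.drop_succ_cons, List.tail_cons, List.cons_append]
      cases ls with
      | nil =>
        simp [pv_join_singleton, String.append_assoc]
      | cons y ys =>
        have hne : (((y :: ys).zip is).map (fun p => p.1 ++ "[" ++ PySem.Int.toStr p.2 ++ "]"))
            ++ (y :: ys).drop is.length ≠ [] := by
          cases is <;> simp
        rw [if_neg (by simp), pv_join_cons _ _ hne, ih is]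
        simp [String.append_assoc]

-- ===== VERDICT (by name: the statement is the Claim_ definition above) =====
theorem construct_instance_path_py_spec : Claim_equal_construct_instance_path_py := by
  intro levels indices _
  unfold Spec_construct_instance_path_py construct_instance_path_py
  rw [alt_eq]
  by_cases h : levels = []
  · subst h; simp [PySem.Str.join, PySem.Chars.join, List.intercalate]
  · rw [if_neg h, pvGoA_eq]
    simp
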